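-- pv_equiv track=rewrite | github.com/songsnim/Img2Tab_pytorch | utils/demo_utils.py | get_l_s_index
-- ===== SOURCE A (Python) =====
-- def get_l_s_index(core, dim_list=None):
--     if dim_list == None:
--         dim_list = [512, 512, 512, 512, 512, 512, 512, 512, 512, 512, 512, 512, 512,
--                     512, 512, 256, 256, 256, 128, 128, 128, 64, 64, 64, 32, 32]
--     for idx, dim in enumerate(dim_list):
--         if core > dim:
--             core -= dim
--         else:
--             return idx, core
-- ===== SOURCE B (Python) =====
-- def _search(core, ds):
--     """First index i of ds with core <= sum(ds[:i+1]), and core minus sum(ds[:i]);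
--     found by divide and conquer: try the left half, else the right half shifted."""
--     n = len(ds)
--     if n == 0:
--         return None
--     if n == 1:
--         return (0, core) if core <= ds[0] else None
--     mid = n // 2
--     left, right = ds[:mid], ds[mid:]
--     res = _search(core, left)
--     if res is not None:
--         return res
--     res = _search(core - sum(left), right)
--     if res is None:
--         return None
--     return res[0] + mid, res[1]
--
-- def get_l_s_index(core, dim_list=None):
--     if dim_list is None:
--         dim_list = [512] * 15 + [256] * 3 + [128] * 3 + [64] * 3 + [32] * 2
--     return _search(core, dim_list)
-- ===== Notes on version B (the rewrite author's own statement) =====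
-- stated objective: alternative
-- what changed: B replaces A's linear subtract-as-you-go scan with a recursive divide-and-conquer search: split the list in half, search the left half, and only on failure search the right half with the left half's sum subtracted, re-offsetting the returned index by the split point.
import Mathlib
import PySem

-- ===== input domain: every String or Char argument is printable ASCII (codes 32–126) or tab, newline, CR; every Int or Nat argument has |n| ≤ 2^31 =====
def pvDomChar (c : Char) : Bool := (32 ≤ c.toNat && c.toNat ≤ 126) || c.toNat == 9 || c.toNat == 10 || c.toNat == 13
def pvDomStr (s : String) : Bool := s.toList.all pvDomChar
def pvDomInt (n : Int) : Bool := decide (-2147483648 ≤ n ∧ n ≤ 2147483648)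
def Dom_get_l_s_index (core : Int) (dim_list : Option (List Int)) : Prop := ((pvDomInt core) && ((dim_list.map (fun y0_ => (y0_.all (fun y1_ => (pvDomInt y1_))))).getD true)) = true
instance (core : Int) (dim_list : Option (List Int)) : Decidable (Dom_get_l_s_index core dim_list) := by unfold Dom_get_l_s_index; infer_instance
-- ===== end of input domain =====

-- B finds the bucket by divide and conquer (search the left half, else the right half
-- with the left half's sum subtracted) instead of A's linear subtract-as-you-go loop;
-- objective: alternative decomposition, same result on every input.


def pvDefaultDims : List Int :=
  [512, 512, 512, 512, 512, 512, 512, 512, 512, 512, 512, 512, 512,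
   512, 512, 256, 256, 256, 128, 128, 128, 64, 64, 64, 32, 32]

-- ===== PORT A =====
-- A's enumerate-loop: carries the mutated core and the running index
def getLSLoopA (core : Int) (ds : List Int) (idx : Int) : Option (Int × Int) :=
  match ds with
  | [] => none
  | d :: rest => if core > d then getLSLoopA (core - d) rest (idx + 1) else some (idx, core)

def get_l_s_index (core : Int) (dim_list : Option (List Int)) : Option (Int × Int) :=
  getLSLoopA core (dim_list.getD pvDefaultDims) 0

-- ===== PORT B =====
-- Source B's _search: divide and conquer; try the left half, else the right half shifted by sum(left)
def pvSearch (core : Int) (ds : List Int) : Option (Int × Int) :=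
  match ds with
  | [] => none
  | [d] => if core ≤ d then some (0, core) else none
  | d1 :: d2 :: rest =>
    let mid := (d1 :: d2 :: rest).length / 2
    let left := (d1 :: d2 :: rest).take mid
    let right := (d1 :: d2 :: rest).drop mid
    match pvSearch core left with
    | some res => some res
    | none =>
      match pvSearch (core - left.sum) right with
      | none => none
      | some (i, r) => some (i + (mid : Int), r)
termination_by ds.length
decreasing_by
  · simp [List.length_take]; omega
  · simp [List.length_drop]; omega

def get_l_s_index_alt (core : Int) (dim_list : Option (List Int)) : Option (Int × Int) :=
  pvSearch core (dim_list.getD pvDefaultDims)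

-- ===== PRECONDITION & SPEC =====
def Spec_get_l_s_index (core : Int) (dim_list : Option (List Int)) (out : Option (Int × Int)) : Prop := out = get_l_s_index_alt core dim_list
instance (core : Int) (dim_list : Option (List Int)) (out : Option (Int × Int)) : Decidable (Spec_get_l_s_index core dim_list out) := by unfold Spec_get_l_s_index; infer_instance

-- ===== CLAIM (what is proved, stated in full; the proofs are below) =====
def Claim_equal_get_l_s_index : Prop := ∀ (core : Int) (dim_list : Option (List Int)), Dom_get_l_s_index core dim_list → Spec_get_l_s_index core dim_list (get_l_s_index core dim_list)

-- ===== LEMMAS AND PROOFS =====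
-- shifting the index accumulator of A's loop only shifts the returned index
theorem loopA_shift (ds : List Int) : ∀ (core idx j : Int),
    getLSLoopA core ds (idx + j) = (getLSLoopA core ds idx).map (fun p => (p.1 + j, p.2)) := by
  induction ds with
  | nil => intro _ _ _; rfl
  | cons d rest ih =>
    intro core idx j
    simp only [getLSLoopA]
    by_cases h : core > d
    · simp only [if_pos h]
      rw [show idx + j + 1 = (idx + 1) + j by ring, ih (core - d) (idx + 1) j]
    · simp [h]

-- A's loop over l ++ r = its loop over l, falling through to r with sum l subtracted
theorem loopA_append (l : List Int) : ∀ (r : List Int) (core idx : Int),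
    getLSLoopA core (l ++ r) idx =
      match getLSLoopA core l idx with
      | some p => some p
      | none => getLSLoopA (core - l.sum) r (idx + (l.length : Int)) := by
  induction l with
  | nil => intro r core idx; simp [getLSLoopA]
  | cons d l' ih =>
    intro r core idx
    simp only [List.cons_append, getLSLoopA]
    by_cases h : core > d
    · simp only [if_pos h]
      rw [ih r (core - d) (idx + 1)]
      have e1 : core - d - l'.sum = core - (d :: l').sum := by simp; ring
      have e2 : (idx + 1) + (l'.length : Int) = idx + (((d :: l').length : Nat) : Int) := by
        simp; ring
      rw [e1, e2]
    · simp [h]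

theorem search_eq : ∀ (n : Nat) (ds : List Int), ds.length ≤ n → ∀ core : Int,
    pvSearch core ds = getLSLoopA core ds 0 := by
  intro n
  induction n with
  | zero =>
    intro ds h core
    have : ds = [] := by cases ds <;> simp_all
    subst this; simp [pvSearch, getLSLoopA]
  | succ n ih =>
    intro ds h core
    match ds with
    | [] => simp [pvSearch, getLSLoopA]
    | [d] =>
      simp only [pvSearch, getLSLoopA]
      split_ifs with h1 h2 <;> first | rfl | omega
    | d1 :: d2 :: rest =>
      rw [pvSearch]
      set L := (d1 :: d2 :: rest).length with hLdef
      have hlen : L = rest.length + 2 := by simp [hLdef]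
      set m := L / 2 with hm
      have hm1 : 1 ≤ m := by omega
      have hmL : m < L := by omega
      have htake : ((d1 :: d2 :: rest).take m).length = m := by
        rw [List.length_take]; omega
      have hdrop : ((d1 :: d2 :: rest).drop m).length = L - m := by
        rw [List.length_drop]
      rw [ih _ (by omega) core, ih _ (by omega) (core - ((d1 :: d2 :: rest).take m).sum)]
      conv_rhs => rw [← List.take_append_drop m (d1 :: d2 :: rest)]
      rw [loopA_append]
      cases getLSLoopA core ((d1 :: d2 :: rest).take m) 0 with
      | some p => rfl
      | none =>
        simp only
        rw [htake, show ((0 : Int) + (m : Int)) = 0 + (m : Int) by ring,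
          loopA_shift _ _ 0 (m : Int)]
        cases getLSLoopA (core - ((d1 :: d2 :: rest).take m).sum) ((d1 :: d2 :: rest).drop m) 0 with
        | none => rfl
        | some p => rfl

-- ===== VERDICT (by name: the statement is the Claim_ definition above) =====
theorem get_l_s_index_spec : Claim_equal_get_l_s_index := by
  intro core dim_list _
  unfold Spec_get_l_s_index get_l_s_index get_l_s_index_alt
  exact (search_eq (dim_list.getD pvDefaultDims).length _ le_rfl core).symm
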